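-- pv_equiv track=rewrite | github.com/oxmedium/COMSPCIISU | main.py | calculate_acc
-- ===== SOURCE A (Python) =====
-- def calculate_acc(typed_words, target_words):
--     """
--     Calculates typing accuracy as a percentage of correct characters.
--
--     Args:
--         typed_words (list): User-typed words.
--         target_words (list): Expected correct words.
--
--     Returns:
--         int: Accuracy percentage.
--     """
--     correct_chars = 0
--     total_chars = 0
--
--     for i in range(len(typed_words)):
--         typed = typed_words[i] if i < len(typed_words) else ""
--         target = target_words[i] if i < len(target_words) else ""
--
--         for j in range(max(len(typed), len(target))):
--             if j < len(typed) and j < len(target):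
--                 if typed[j] == target[j]:
--                     correct_chars += 1
--             total_chars += 1
--
--     if total_chars == 0:
--         return 0
--     return round((correct_chars / total_chars) * 100)
-- ===== SOURCE B (Python) =====
-- def calculate_acc(typed_words, target_words):
--     """
--     Calculates typing accuracy as a percentage of correct characters.
--
--     Align-and-compare strategy: pad the target list with "" to the length of
--     typed_words, pad each word of a pair to the pair's width with a distinct
--     sentinel on each side (so a padded position can never look correct for
--     ordinary text), concatenate each side into one flat character stream, and
--     count matches in a single zip pass over the two equal-length streams.
--     """
--     targets = (target_words + [""] * len(typed_words))[:len(typed_words)]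
--     left = "".join(t + "\x00" * (len(g) - len(t)) for t, g in zip(typed_words, targets))
--     right = "".join(g + "\x01" * (len(t) - len(g)) for t, g in zip(typed_words, targets))
--     total_chars = len(left)
--     if total_chars == 0:
--         return 0
--     correct_chars = sum(a == b for a, b in zip(left, right))
--     return round((correct_chars / total_chars) * 100)
-- ===== Notes on version B (the rewrite author's own statement) =====
-- stated objective: alternative
-- what changed: Replaces A's indexed double loop with per-position bounds checks by an align-and-compare algorithm: the target list is padded with empty strings, each word pair is padded to its width with a distinct sentinel per side, both sides are concatenated into two equal-length flat character streams, and matches are counted in one flat zip pass. (constant-factor speedup: the per-character work moves from an interpreted indexed inner loop into bulk string concatenation and one flat zip pass)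
import Mathlib
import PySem

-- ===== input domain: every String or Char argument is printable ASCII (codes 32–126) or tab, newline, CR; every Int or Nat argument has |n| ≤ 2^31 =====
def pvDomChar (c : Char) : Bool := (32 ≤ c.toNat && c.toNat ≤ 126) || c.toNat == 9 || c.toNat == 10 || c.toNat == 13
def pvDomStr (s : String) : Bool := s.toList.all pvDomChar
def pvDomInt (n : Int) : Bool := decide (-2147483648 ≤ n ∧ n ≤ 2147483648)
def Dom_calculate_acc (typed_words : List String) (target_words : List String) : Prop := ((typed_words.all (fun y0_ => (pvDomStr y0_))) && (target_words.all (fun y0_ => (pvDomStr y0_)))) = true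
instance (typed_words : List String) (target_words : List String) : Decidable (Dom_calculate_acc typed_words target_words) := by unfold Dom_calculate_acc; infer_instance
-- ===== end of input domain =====

-- B replaces A's indexed double loop by an align-and-compare pass: both sides are padded
-- into two equal-length flat character streams and matches are counted in one zip pass;
-- the return values are proved equal on the stated domain.

-- ===== shared helper: exact emulation of Python's round((c/t)*100) on IEEE doubles =====
-- round-half-to-even of the exact rational p/q (q > 0)
def pvRHE (p q : Nat) : Nat :=
  let Q := p / q
  let r := p % q
  if 2 * r < q then Q else if 2 * r > q then Q + 1 else if Q % 2 = 0 then Q else Q + 1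

-- smallest j with m * 2^j ≥ t (fuel-bounded doubling search)
def pvFindJ : Nat → Nat → Nat → Nat
  | 0, _, _ => 0
  | fuel + 1, m, t => if m < t then pvFindJ fuel (2 * m) t + 1 else 0

-- exact value of Python's round((c/t)*100) for integers 0 ≤ c ≤ t, 0 < t:
-- d1 = fl(c/t) (nearest double), d2 = fl(d1*100), then round-half-even to int
def pvRound100Nat (c t : Nat) : Nat :=
  if c = 0 then 0 else
  let j := pvFindJ t c t
  let m := pvRHE (c * 2 ^ (52 + j)) t
  let me : Nat × Int := if m = 2 ^ 53 then (2 ^ 52, -(j : Int) - 52 + 1) else (m, -(j : Int) - 52)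
  let x := me.1 * 100
  let b := Nat.log2 x
  let m2e2 : Nat × Int :=
    if b ≤ 52 then (x, me.2) else
      let m2 := pvRHE x (2 ^ (b - 52))
      if m2 = 2 ^ 53 then (2 ^ 52, me.2 + (b - 52) + 1) else (m2, me.2 + (b - 52))
  if 0 ≤ m2e2.2 then m2e2.1 * 2 ^ m2e2.2.toNat else pvRHE m2e2.1 (2 ^ (-m2e2.2).toNat)

def pvRound100 (c t : Int) : Int := (pvRound100Nat c.toNat t.toNat : Int)

-- ===== PORT A =====
-- inner per-word loop of A: for j in range(max(len(typed), len(target))): …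
def pvInner (typed target : String) (st : Int × Int) : Int × Int :=
  let a := typed.toList
  let b := target.toList
  (List.range (max a.length b.length)).foldl
    (fun (st : Int × Int) j =>
      ((if j < a.length ∧ j < b.length ∧ a.getD j ' ' = b.getD j ' ' then st.1 + 1 else st.1),
       st.2 + 1))
    st

def calculate_acc (typed_words : List String) (target_words : List String) : Int :=
  let st : Int × Int :=
    (List.range typed_words.length).foldl
      (fun (st : Int × Int) i =>
        pvInner (if i < typed_words.length then typed_words.getD i "" else "")
          (if i < target_words.length then target_words.getD i "" else "") st)
      (0, 0)
  if st.2 = 0 then 0 else pvRound100 st.1 st.2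

-- ===== PORT B =====
-- t + "\x00" * (len(g) - len(t))  (Python's negative repeat count gives "", like Nat subtraction)
def pvLeftOf (p : String × String) : List Char :=
  p.1.toList ++ List.replicate (p.2.toList.length - p.1.toList.length) (Char.ofNat 0)
-- g + "\x01" * (len(t) - len(g))
def pvRightOf (p : String × String) : List Char :=
  p.2.toList ++ List.replicate (p.1.toList.length - p.2.toList.length) (Char.ofNat 1)

def calculate_acc_alt (typed_words : List String) (target_words : List String) : Int :=
  let targets := (target_words ++ List.replicate typed_words.length "").take typed_words.length
  let left := ((typed_words.zip targets).map pvLeftOf).flatten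
  let right := ((typed_words.zip targets).map pvRightOf).flatten
  let total_chars : Int := (left.length : Int)
  if total_chars = 0 then 0 else
    let correct_chars : Int := ((left.zip right).countP (fun q => q.1 == q.2) : Int)
    pvRound100 correct_chars total_chars

-- ===== PRECONDITION & SPEC =====
def Spec_calculate_acc (typed_words : List String) (target_words : List String) (out : Int) : Prop := out = calculate_acc_alt typed_words target_words
instance (typed_words : List String) (target_words : List String) (out : Int) : Decidable (Spec_calculate_acc typed_words target_words out) := by unfold Spec_calculate_acc; infer_instance

-- ===== CLAIM (what is proved, stated in full; the proofs are below) =====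
def Claim_equal_calculate_acc : Prop := ∀ (typed_words : List String) (target_words : List String), Dom_calculate_acc typed_words target_words → Spec_calculate_acc typed_words target_words (calculate_acc typed_words target_words)

-- ===== LEMMAS AND PROOFS =====

def pvCountEq (a b : List Char) : Int := ((a.zip b).countP (fun q => q.1 == q.2) : Int)

theorem inner_fold (n : Nat) : ∀ (a b : List Char) (c t : Int), max a.length b.length = n →
    (List.range n).foldl
      (fun (st : Int × Int) j =>
        ((if j < a.length ∧ j < b.length ∧ a.getD j ' ' = b.getD j ' ' then st.1 + 1 else st.1),
         st.2 + 1))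
      (c, t)
    = (c + pvCountEq a b, t + (n : Int)) := by
  induction n with
  | zero =>
    intro a b c t h
    have ha : a = [] := List.length_eq_zero_iff.mp (by omega)
    have hb : b = [] := List.length_eq_zero_iff.mp (by omega)
    subst ha; subst hb
    simp [pvCountEq]
  | succ n ih =>
    intro a b c t h
    rw [List.range_succ_eq_map, List.foldl_cons, List.foldl_map]
    have hshift :
        (fun (st : Int × Int) (j : Nat) =>
          ((if j + 1 < a.length ∧ j + 1 < b.length ∧ a.getD (j + 1) ' ' = b.getD (j + 1) ' ' then st.1 + 1 else st.1),
           st.2 + 1))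
        = (fun (st : Int × Int) (j : Nat) =>
          ((if j < a.tail.length ∧ j < b.tail.length ∧ a.tail.getD j ' ' = b.tail.getD j ' ' then st.1 + 1 else st.1),
           st.2 + 1)) := by
      funext st j
      have h1 : (j + 1 < a.length ∧ j + 1 < b.length ∧ a.getD (j + 1) ' ' = b.getD (j + 1) ' ')
          ↔ (j < a.tail.length ∧ j < b.tail.length ∧ a.tail.getD j ' ' = b.tail.getD j ' ') := by
        cases a with
        | nil => simp
        | cons x xs =>
          cases b with
          | nil => simp
          | cons y ys => simp
      simp only [h1]
    rw [hshift]
    have hmax : max a.tail.length b.tail.length = n := by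
      rcases a with _ | ⟨x, xs⟩ <;> rcases b with _ | ⟨y, ys⟩ <;> simp_all
    rw [ih a.tail b.tail _ _ hmax]
    rcases a with _ | ⟨x, xs⟩ <;> rcases b with _ | ⟨y, ys⟩
    · simp at h
    · simp [pvCountEq]
      try push_cast
      try ring
    · simp [pvCountEq]
      try push_cast
      try ring
    · by_cases hxy : x = y
      · simp [pvCountEq, hxy]
        try push_cast
        try omega
        try exact ⟨trivial, trivial⟩
      · simp [pvCountEq, hxy]
        try push_cast
        try omega
        try exact ⟨trivial, trivial⟩

theorem pvInner_eq (typed target : String) (c t : Int) :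
    pvInner typed target (c, t)
    = (c + pvCountEq typed.toList target.toList,
       t + ((max typed.toList.length target.toList.length : Nat) : Int)) := by
  unfold pvInner
  exact inner_fold _ typed.toList target.toList c t rfl

theorem outer_fold : ∀ (tw gw : List String) (c t : Int),
    (List.range tw.length).foldl
      (fun (st : Int × Int) i =>
        pvInner (if i < tw.length then tw.getD i "" else "")
          (if i < gw.length then gw.getD i "" else "") st)
      (c, t)
    = (c + ((tw.zip gw).map (fun p => pvCountEq p.1.toList p.2.toList)).sum,
       t + (((tw.zip gw).map (fun p => ((max p.1.toList.length p.2.toList.length : Nat) : Int))).sum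
            + ((tw.drop gw.length).map (fun w => ((w.toList.length : Nat) : Int))).sum)) := by
  intro tw
  induction tw with
  | nil => intro gw c t; simp
  | cons w ws ih =>
    intro gw c t
    rw [List.length_cons, List.range_succ_eq_map, List.foldl_cons, List.foldl_map]
    have hshift :
        (fun (st : Int × Int) (i : Nat) =>
          pvInner (if i.succ < ws.length + 1 then (w :: ws).getD i.succ "" else "")
            (if i.succ < gw.length then gw.getD i.succ "" else "") st)
        = (fun (st : Int × Int) (i : Nat) =>
          pvInner (if i < ws.length then ws.getD i "" else "")
            (if i < gw.tail.length then gw.tail.getD i "" else "") st) := by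
      funext st i
      have e1 : (if i.succ < ws.length + 1 then (w :: ws).getD i.succ "" else "")
          = (if i < ws.length then ws.getD i "" else "") := by simp
      have e2 : (if i.succ < gw.length then gw.getD i.succ "" else "")
          = (if i < gw.tail.length then gw.tail.getD i "" else "") := by
        cases gw with
        | nil => simp
        | cons g gs => simp
      rw [e1, e2]
    rw [hshift]
    have h0 : (if 0 < ws.length + 1 then (w :: ws).getD 0 "" else "") = w := by simp
    rw [h0, pvInner_eq, ih gw.tail]
    cases gw with
    | nil =>
      simp [pvCountEq]
      try push_cast
      try omega
      try exact ⟨trivial, trivial⟩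
    | cons g gs =>
      simp [List.zip_cons_cons, List.drop_succ_cons]
      try push_cast
      try omega
      try exact ⟨trivial, trivial⟩

-- ===== B-side lemmas =====

theorem dom_char_ne (c : Char) (h : pvDomChar c = true) :
    c ≠ Char.ofNat 0 ∧ c ≠ Char.ofNat 1 := by
  constructor <;> intro he <;> rw [he] at h <;> simp [pvDomChar] at h

theorem zip_rep_left (u0 : Char) : ∀ (b : List Char) (n : Nat), (∀ c ∈ b, c ≠ u0) →
    ((List.replicate n u0).zip b).countP (fun q => q.1 == q.2) = 0 := by
  intro b
  induction b with
  | nil => intro n _; simp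
  | cons y ys ih =>
    intro n h
    cases n with
    | zero => simp
    | succ m =>
      have hy : ¬ (u0 = y) := fun he => (h y (by simp)) he.symm
      simp [List.replicate_succ, ih m (fun c hc => h c (by simp [hc])), hy]

theorem zip_rep_right (u1 : Char) : ∀ (a : List Char) (n : Nat), (∀ c ∈ a, c ≠ u1) →
    (a.zip (List.replicate n u1)).countP (fun q => q.1 == q.2) = 0 := by
  intro a
  induction a with
  | nil => intro n _; simp
  | cons x xs ih =>
    intro n h
    cases n with
    | zero => simp
    | succ m =>
      have hx : x ≠ u1 := h x (by simp)
      simp [List.replicate_succ, ih m (fun c hc => h c (by simp [hc])), hx]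

theorem pad_block : ∀ (a b : List Char),
    (∀ c ∈ a, c ≠ Char.ofNat 1) → (∀ c ∈ b, c ≠ Char.ofNat 0) →
    ((a ++ List.replicate (b.length - a.length) (Char.ofNat 0)).zip
       (b ++ List.replicate (a.length - b.length) (Char.ofNat 1))).countP (fun q => q.1 == q.2)
      = (a.zip b).countP (fun q => q.1 == q.2) := by
  intro a
  induction a with
  | nil =>
    intro b _ hb
    simpa using zip_rep_left (Char.ofNat 0) b b.length hb
  | cons x xs ih =>
    intro b ha hb
    cases b with
    | nil =>
      simpa using zip_rep_right (Char.ofNat 1) (x :: xs) (xs.length + 1) ha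
    | cons y ys =>
      have h1 : (y :: ys).length - (x :: xs).length = ys.length - xs.length := by simp
      have h2 : (x :: xs).length - (y :: ys).length = xs.length - ys.length := by simp
      rw [h1, h2]
      simp only [List.cons_append, List.zip_cons_cons, List.countP_cons]
      rw [ih ys (fun c hc => ha c (by simp [hc])) (fun c hc => hb c (by simp [hc]))]

theorem pad_left_len (a b : List Char) :
    (a ++ List.replicate (b.length - a.length) (Char.ofNat 0)).length = max a.length b.length := by
  simp; omega

theorem targets_eq (tw gw : List String) :
    (gw ++ List.replicate tw.length "").take tw.length
      = gw.take tw.length ++ List.replicate (tw.length - gw.length) "" := by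
  rw [List.take_append, List.take_replicate]
  congr 1
  congr 1
  omega

theorem flat_stats : ∀ (tw gw : List String),
    (∀ s ∈ tw, ∀ c ∈ s.toList, pvDomChar c = true) →
    (∀ s ∈ gw, ∀ c ∈ s.toList, pvDomChar c = true) →
    ((((tw.zip (gw.take tw.length ++ List.replicate (tw.length - gw.length) "")).map pvLeftOf).flatten.zip
        ((tw.zip (gw.take tw.length ++ List.replicate (tw.length - gw.length) "")).map pvRightOf).flatten).countP
        (fun q => q.1 == q.2)
      = ((tw.zip gw).map (fun p => (p.1.toList.zip p.2.toList).countP (fun q => q.1 == q.2))).sum)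
    ∧ (((tw.zip (gw.take tw.length ++ List.replicate (tw.length - gw.length) "")).map pvLeftOf).flatten.length
      = ((tw.zip gw).map (fun p => max p.1.toList.length p.2.toList.length)).sum
        + ((tw.drop gw.length).map (fun w => w.toList.length)).sum) := by
  intro tw
  induction tw with
  | nil => intro gw _ _; simp
  | cons w ws ih =>
    intro gw htw hgw
    have hw : ∀ c ∈ w.toList, pvDomChar c = true := htw w (by simp)
    have hws : ∀ s ∈ ws, ∀ c ∈ s.toList, pvDomChar c = true := fun s hs => htw s (by simp [hs])
    have hwa : ∀ c ∈ w.toList, c ≠ Char.ofNat 1 := fun c hc => (dom_char_ne c (hw c hc)).2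
    cases gw with
    | nil =>
      have ihr := ih [] hws (by simp)
      simp only [List.take_nil, List.nil_append, List.length_cons, List.length_nil,
        Nat.sub_zero] at ihr ⊢
      rw [List.replicate_succ]
      constructor
      · simp only [List.zip_cons_cons, List.map_cons, List.flatten_cons]
        rw [List.zip_append (by simp [pvLeftOf, pvRightOf]; try omega)]
        rw [List.countP_append]
        have hblock : ((pvLeftOf (w, "")).zip (pvRightOf (w, ""))).countP (fun q => q.1 == q.2) = 0 := by
          simp only [pvLeftOf, pvRightOf]
          have := pad_block w.toList "".toList hwa (by simp)
          rw [this]; simp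
        rw [hblock, ihr.1]
        simp
      · simp only [List.zip_cons_cons, List.map_cons, List.flatten_cons, List.length_append]
        rw [ihr.2]
        simp [pvLeftOf]
    | cons g gs =>
      have hg : ∀ c ∈ g.toList, pvDomChar c = true := hgw g (by simp)
      have hgs : ∀ s ∈ gs, ∀ c ∈ s.toList, pvDomChar c = true := fun s hs => hgw s (by simp [hs])
      have hgb : ∀ c ∈ g.toList, c ≠ Char.ofNat 0 := fun c hc => (dom_char_ne c (hg c hc)).1
      have hcons : ((g :: gs).take (w :: ws).length ++ List.replicate ((w :: ws).length - (g :: gs).length) "")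
          = g :: (gs.take ws.length ++ List.replicate (ws.length - gs.length) "") := by
        simp [List.take_succ_cons]
      have ihr := ih gs hws hgs
      rw [hcons]
      constructor
      · simp only [List.zip_cons_cons, List.map_cons, List.flatten_cons]
        rw [List.zip_append (by simp [pvLeftOf, pvRightOf]; try omega)]
        rw [List.countP_append]
        have hblock : ((pvLeftOf (w, g)).zip (pvRightOf (w, g))).countP (fun q => q.1 == q.2)
            = (w.toList.zip g.toList).countP (fun q => q.1 == q.2) := by
          simp only [pvLeftOf, pvRightOf]
          exact pad_block w.toList g.toList hwa hgb
        rw [hblock, ihr.1]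
        simp
      · simp only [List.zip_cons_cons, List.map_cons, List.flatten_cons, List.length_append]
        rw [ihr.2]
        simp only [pvLeftOf]
        rw [show ((w, g).1.toList ++ List.replicate ((w, g).2.toList.length - (w, g).1.toList.length) (Char.ofNat 0)).length
            = max w.toList.length g.toList.length from pad_left_len w.toList g.toList]
        simp [List.sum_cons]
        omega

theorem sum_map_cast {α : Type} (l : List α) (f : α → Nat) :
    (l.map (fun x => ((f x : Nat) : Int))).sum = (((l.map f).sum : Nat) : Int) := by
  rw [Nat.cast_list_sum, List.map_map]
  rfl

-- ===== VERDICT (by name: the statement is the Claim_ definition above) =====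
theorem calculate_acc_spec : Claim_equal_calculate_acc := by
  intro tw gw hdom
  show calculate_acc tw gw = calculate_acc_alt tw gw
  have hdom' := hdom
  unfold Dom_calculate_acc at hdom'
  simp only [Bool.and_eq_true, List.all_eq_true, pvDomStr] at hdom'
  have htw : ∀ s ∈ tw, ∀ c ∈ s.toList, pvDomChar c = true := by
    intro s hs c hc
    exact hdom'.1 s hs c hc
  have hgw : ∀ s ∈ gw, ∀ c ∈ s.toList, pvDomChar c = true := by
    intro s hs c hc
    exact hdom'.2 s hs c hc
  have hfs := flat_stats tw gw htw hgw
  simp only [calculate_acc, calculate_acc_alt]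
  rw [outer_fold tw gw 0 0, targets_eq tw gw]
  rw [hfs.1, hfs.2]
  have hc : ((tw.zip gw).map (fun p => pvCountEq p.1.toList p.2.toList)).sum
      = ((((tw.zip gw).map (fun p => (p.1.toList.zip p.2.toList).countP (fun q => q.1 == q.2))).sum : Nat) : Int) := by
    rw [← sum_map_cast]
    rfl
  have ht : (((tw.zip gw).map (fun p => ((max p.1.toList.length p.2.toList.length : Nat) : Int))).sum
        + ((tw.drop gw.length).map (fun w => ((w.toList.length : Nat) : Int))).sum)
      = ((((tw.zip gw).map (fun p => max p.1.toList.length p.2.toList.length)).sum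
          + ((tw.drop gw.length).map (fun w => w.toList.length)).sum : Nat) : Int) := by
    rw [sum_map_cast (tw.zip gw) (fun p => max p.1.toList.length p.2.toList.length),
      sum_map_cast (tw.drop gw.length) (fun w => w.toList.length)]
    push_cast
    ring
  rw [zero_add, zero_add, hc, ht]
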